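-- pv_equiv track=rewrite | github.com/hickendorffbas/balan2 | compiler/main.py | split_all_tokens
-- ===== SOURCE A (Python) =====
-- def split_all_tokens(tokens, masked_token_types, token_type):
--     splits = []
--     cur_split = []
--     for idx in range(0, len(tokens)):
--         if masked_token_types[idx] == token_type:
--             splits.append(cur_split)
--             cur_split = []
--         else:
--             cur_split.append(tokens[idx])
--     if cur_split:
--         splits.append(cur_split)
--     return splits
-- ===== SOURCE B (Python) =====
-- def split_all_tokens(tokens, masked_token_types, token_type):
--     # Recursive decomposition: cut at the first separator, recurse on the rest.
--     for i, t in enumerate(masked_token_types[:len(tokens)]):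
--         if t == token_type:
--             return [tokens[:i]] + split_all_tokens(tokens[i+1:], masked_token_types[i+1:], token_type)
--     return [tokens] if tokens else []
-- ===== Notes on version B (the rewrite author's own statement) =====
-- stated objective: alternative
-- what changed: Replaces the single element-wise accumulating loop over all indices by a recursive divide: find the first separator position and slice the list there, recursing on the remainder (the trailing segment is kept only if non-empty, as in A).
import Mathlib
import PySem

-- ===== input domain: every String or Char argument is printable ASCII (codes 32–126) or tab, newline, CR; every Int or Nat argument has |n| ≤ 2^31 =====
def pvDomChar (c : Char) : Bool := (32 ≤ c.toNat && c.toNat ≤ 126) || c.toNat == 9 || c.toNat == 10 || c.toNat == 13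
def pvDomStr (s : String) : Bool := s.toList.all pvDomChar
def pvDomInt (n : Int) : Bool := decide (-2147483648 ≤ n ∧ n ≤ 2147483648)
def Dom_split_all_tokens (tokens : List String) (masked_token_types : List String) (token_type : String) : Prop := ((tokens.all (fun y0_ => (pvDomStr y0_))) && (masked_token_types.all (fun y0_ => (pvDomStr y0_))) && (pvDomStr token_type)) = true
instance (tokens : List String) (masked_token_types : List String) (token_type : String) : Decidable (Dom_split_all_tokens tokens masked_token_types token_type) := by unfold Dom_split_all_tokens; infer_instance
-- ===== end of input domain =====

-- B replaces A's single accumulating loop by recursion that cuts at the first separator; same cost, different decomposition (return-value equivalence only).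

-- ===== PORT A =====
-- one loop over range(len(tokens)), state (splits, cur_split); lookups via pyGetD (in range under Pre_)
def split_all_tokens (tokens : List String) (masked_token_types : List String) (token_type : String) : List (List String) :=
  let st := (PySem.List.pyRange 0 tokens.length 1).foldl
    (fun (st : List (List String) × List String) idx =>
      if PySem.List.pyGetD masked_token_types idx "" == token_type then (st.1 ++ [st.2], ([] : List String))
      else (st.1, st.2 ++ [PySem.List.pyGetD tokens idx ""]))
    ([], [])
  if st.2.isEmpty then st.1 else st.1 ++ [st.2]

-- ===== PORT B =====
-- find the first separator in masked_token_types[:len(tokens)], slice, recurse on the remainder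
def split_all_tokens_alt (tokens : List String) (masked_token_types : List String) (token_type : String) : List (List String) :=
  match h : (masked_token_types.take tokens.length).findIdx? (· == token_type) with
  | none => if tokens.isEmpty then [] else [tokens]
  | some i => tokens.take i :: split_all_tokens_alt (tokens.drop (i+1)) (masked_token_types.drop (i+1)) token_type
termination_by tokens.length
decreasing_by
  have hi : i < (masked_token_types.take tokens.length).length := List.findIdx?_eq_some_iff_findIdx_eq.mp h |>.1
  simp at hi ⊢; omega

-- ===== PRECONDITION & SPEC =====
-- Pre_ excludes exactly the inputs where A raises IndexError (masked list shorter than tokens)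
def Pre_split_all_tokens (tokens : List String) (masked_token_types : List String) (token_type : String) : Prop :=
  tokens.length ≤ masked_token_types.length
instance (tokens : List String) (masked_token_types : List String) (token_type : String) : Decidable (Pre_split_all_tokens tokens masked_token_types token_type) := by unfold Pre_split_all_tokens; infer_instance
def pvWitness_split_all_tokens : List String × List String × String := (["a", "b", "c"], ["T", "X", "X"], "T")

def Spec_split_all_tokens (tokens : List String) (masked_token_types : List String) (token_type : String) (out : List (List String)) : Prop := out = split_all_tokens_alt tokens masked_token_types token_type
instance (tokens : List String) (masked_token_types : List String) (token_type : String) (out : List (List String)) : Decidable (Spec_split_all_tokens tokens masked_token_types token_type out) := by unfold Spec_split_all_tokens; infer_instance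

-- ===== CLAIM (what is proved, stated in full; the proofs are below) =====
def Claim_equal_split_all_tokens : Prop := ∀ (tokens : List String) (masked_token_types : List String) (token_type : String), Dom_split_all_tokens tokens masked_token_types token_type → Pre_split_all_tokens tokens masked_token_types token_type → Spec_split_all_tokens tokens masked_token_types token_type (split_all_tokens tokens masked_token_types token_type)

-- ===== LEMMAS AND PROOFS =====

-- A's loop body as a function of the (token, type) pair
def pvStep (tt : String) (st : List (List String) × List String) (p : String × String) : List (List String) × List String :=
  if p.2 == tt then (st.1 ++ [st.2], ([] : List String)) else (st.1, st.2 ++ [p.1])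

-- A's result, structurally over the zipped lists
def pvAfold (tt : String) (pairs : List (String × String)) : List (List String) :=
  let st := pairs.foldl (pvStep tt) ([], [])
  if st.2.isEmpty then st.1 else st.1 ++ [st.2]

theorem range_fold_eq_zip_fold (tokens masked : List String) (tt : String)
    (h : tokens.length ≤ masked.length) :
    split_all_tokens tokens masked tt = pvAfold tt (tokens.zip masked) := by
  have hlen : ((tokens.zip masked).length : Int) = (tokens.length : Int) := by
    simp [List.length_zip]; omega
  have key :
      (PySem.List.pyRange 0 (tokens.length : Int) 1).foldl
        (fun (st : List (List String) × List String) idx =>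
          if PySem.List.pyGetD masked idx "" == tt then (st.1 ++ [st.2], ([] : List String))
          else (st.1, st.2 ++ [PySem.List.pyGetD tokens idx ""]))
        ([], [])
      = (tokens.zip masked).foldl (pvStep tt) ([], []) := by
    rw [← hlen]
    rw [PySem.List.foldl_congr_mem _ _
        (fun (st : List (List String) × List String) j =>
          pvStep tt st (PySem.List.pyGetD (tokens.zip masked) j ("", ""))) _ ?hcong]
    · exact PySem.List.foldl_pyRange_zero_pyGetD' (tokens.zip masked) ("", "") (pvStep tt) ([], [])
    case hcong =>
      intro st j hj
      have hj' := PySem.List.mem_pyRange_one.mp hj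
      have hzlen : (tokens.zip masked).length = tokens.length := by simp [List.length_zip]; omega
      have h0 : 0 ≤ j := hj'.1
      have h1 : j < ((tokens.zip masked).length : Int) := hj'.2
      have hjt : j < (tokens.length : Int) := by rw [hzlen] at h1; exact h1
      have hjm : j < (masked.length : Int) := by omega
      simp only [pvStep]
      rw [PySem.List.pyGetD_eq_getElem (tokens.zip masked) ("", "") h0 h1, List.getElem_zip,
          PySem.List.pyGetD_eq_getElem tokens "" h0 hjt, PySem.List.pyGetD_eq_getElem masked "" h0 hjm]
  simp only [split_all_tokens, pvAfold, key]

theorem pvZipDrop {A B : Type} (a : List A) (b : List B) (k : ℕ) :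
    (a.zip b).drop k = (a.drop k).zip (b.drop k) := by
  induction k generalizing a b with
  | zero => simp
  | succ k ihk =>
    cases a with
    | nil => simp
    | cons x xs =>
      cases b with
      | nil => simp
      | cons y ys => simpa using ihk xs ys

def pvAltFrom (tt : String) : List String → List (String × String) → List (List String)
  | cur, [] => if cur.isEmpty then [] else [cur]
  | cur, p :: rest => if p.2 == tt then cur :: pvAltFrom tt [] rest else pvAltFrom tt (cur ++ [p.1]) rest

theorem afold_eq_altFrom (tt : String) (pairs : List (String × String))
    (splits : List (List String)) (cur : List String) :
    (let st := pairs.foldl (pvStep tt) (splits, cur);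
     if st.2.isEmpty then st.1 else st.1 ++ [st.2]) = splits ++ pvAltFrom tt cur pairs := by
  induction pairs generalizing splits cur with
  | nil => simp [pvAltFrom]; split <;> simp_all
  | cons p rest ih =>
    simp only [List.foldl_cons, pvStep, pvAltFrom]
    by_cases hp : p.2 == tt
    · simp only [hp, if_true, List.isEmpty_iff] at ih ⊢
      rw [ih (splits ++ [cur]) []]; simp
    · simp only [hp, Bool.false_eq_true, if_false, List.isEmpty_iff] at ih ⊢
      rw [ih splits (cur ++ [p.1])]

theorem altFrom_no_sep (tt : String) (pairs : List (String × String)) (cur : List String)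
    (h : ∀ p ∈ pairs, ¬(p.2 == tt)) :
    pvAltFrom tt cur pairs =
      if (cur ++ pairs.map Prod.fst).isEmpty then [] else [cur ++ pairs.map Prod.fst] := by
  induction pairs generalizing cur with
  | nil => simp [pvAltFrom]
  | cons p rest ih =>
    have hp : ¬(p.2 == tt) := h p (by simp)
    simp only [pvAltFrom, hp, Bool.false_eq_true, if_false]
    rw [ih (cur ++ [p.1]) (fun q hq => h q (by simp [hq]))]
    simp

theorem altFrom_split (tt : String) (p1 : List (String × String)) (p : String × String)
    (p2 : List (String × String)) (cur : List String)
    (h1 : ∀ q ∈ p1, ¬(q.2 == tt)) (hp : p.2 == tt) :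
    pvAltFrom tt cur (p1 ++ p :: p2) = (cur ++ p1.map Prod.fst) :: pvAltFrom tt [] p2 := by
  induction p1 generalizing cur with
  | nil => simp [pvAltFrom, hp]
  | cons q rest ih =>
    have hq : ¬(q.2 == tt) := h1 q (by simp)
    simp only [List.cons_append, pvAltFrom, hq, Bool.false_eq_true, if_false]
    rw [ih (cur ++ [q.1]) (fun r hr => h1 r (by simp [hr]))]
    simp

theorem altFrom_eq_alt (tokens masked : List String) (tt : String)
    (h : tokens.length ≤ masked.length) :
    pvAltFrom tt [] (tokens.zip masked) = split_all_tokens_alt tokens masked tt := by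
  have main : ∀ (n : ℕ) (tokens masked : List String), tokens.length = n →
      tokens.length ≤ masked.length →
      pvAltFrom tt [] (tokens.zip masked) = split_all_tokens_alt tokens masked tt := by
    intro n
    induction n using Nat.strong_induction_on with
    | _ n ih =>
      intro tokens masked hn h
      have hmt : (masked.take tokens.length).length = tokens.length := by simp; omega
      have hzlen : (tokens.zip masked).length = tokens.length := by simp [List.length_zip]; omega
      rw [split_all_tokens_alt.eq_def]
      cases hfind : (masked.take tokens.length).findIdx? (· == tt) with
      | none =>
        have hall := List.findIdx?_eq_none_iff.mp hfind
        rw [altFrom_no_sep tt (tokens.zip masked) []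
          (fun p hp => by
            obtain ⟨j, hj, hpe⟩ := List.mem_iff_getElem.mp hp
            have hjt : j < tokens.length := by omega
            have h2 : p.2 = masked[j] := by
              rw [← hpe, List.getElem_zip]
            have := hall (masked.take tokens.length)[j]
              (List.mem_iff_getElem.mpr ⟨j, by omega, rfl⟩)
            rw [List.getElem_take] at this
            simp [h2, this])]
        rw [List.map_fst_zip h]
        cases tokens <;> simp
      | some i =>
        obtain ⟨hilt, hpi, hprev⟩ := List.findIdx?_eq_some_iff_getElem.mp hfind
        have hit : i < tokens.length := by omega
        have hiz : i < (tokens.zip masked).length := by omega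
        have hdecomp : tokens.zip masked =
            (tokens.zip masked).take i ++ (tokens.zip masked)[i] :: (tokens.zip masked).drop (i + 1) := by
          conv_lhs => rw [← List.take_append_drop i (tokens.zip masked)]
          rw [List.drop_eq_getElem_cons hiz]
        rw [hdecomp, altFrom_split tt _ _ _ []
          (fun q hq => by
            obtain ⟨j, hj, hqe⟩ := List.mem_iff_getElem.mp hq
            have hjlt : j < i := by simp at hj; omega
            have h2 : q.2 = masked[j] := by
              rw [← hqe, List.getElem_take, List.getElem_zip]
            have := hprev j hjlt
            rw [List.getElem_take] at this
            simpa [h2] using this)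
          (by rw [List.getElem_take] at hpi; rw [List.getElem_zip]; exact hpi)]
        have hfst : ((tokens.zip masked).take i).map Prod.fst = tokens.take i := by
          rw [List.map_take, List.map_fst_zip h]
        have hdrop : (tokens.zip masked).drop (i + 1) =
            (tokens.drop (i + 1)).zip (masked.drop (i + 1)) := pvZipDrop tokens masked (i + 1)
        rw [hfst, hdrop, ih (tokens.length - (i + 1)) (by omega) _ _ (by simp) (by simp; omega)]
        simp
  exact main tokens.length tokens masked rfl h

-- ===== VERDICT (by name: the statement is the Claim_ definition above) =====
theorem split_all_tokens_spec : Claim_equal_split_all_tokens := by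
  intro tokens masked tt _ hpre
  unfold Spec_split_all_tokens
  rw [range_fold_eq_zip_fold tokens masked tt hpre, ← altFrom_eq_alt tokens masked tt hpre]
  simpa [pvAfold] using afold_eq_altFrom tt (tokens.zip masked) [] []
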